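-- pv_equiv track=rewrite | github.com/AndryRafam/Algo-Dojo | String/Dasha_Nightmares.py | is_nightmare
-- ===== SOURCE A (Python) =====
-- from collections import Counter
--
-- def is_nightmare(a:str,b:str)->bool:
--     t = a+b
--     if(len(t)%2==0):
--         return False
--     occur = set()
--     for i in range(len(t)):
--         occur.add(t[i])
--     if(len(occur)!=25):
--         return False
--     freq = Counter(t)
--     for(key,val) in freq.items():
--         if(val%2==0):
--             return False
--     return True
-- ===== SOURCE B (Python) =====
-- def is_nightmare(a: str, b: str) -> bool:
--     t = a + b
--     if len(t) % 2 == 0: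
--         return False
--     s = sorted(t)
--     cur = s[0]
--     runlen = 1
--     groups = 0
--     for c in s[1:]:
--         if c == cur:
--             runlen += 1
--         else:
--             if runlen % 2 == 0:
--                 return False
--             cur, runlen, groups = c, 1, groups + 1
--     return runlen % 2 == 1 and groups + 1 == 25
-- ===== Notes on version B (the rewrite author's own statement) =====
-- stated objective: alternative
-- what changed: Replaces the set-building loop plus Counter plus dict-iteration check by a single sort followed by one run-length scan over the sorted characters, counting groups and rejecting on the first even run.
import Mathlib
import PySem

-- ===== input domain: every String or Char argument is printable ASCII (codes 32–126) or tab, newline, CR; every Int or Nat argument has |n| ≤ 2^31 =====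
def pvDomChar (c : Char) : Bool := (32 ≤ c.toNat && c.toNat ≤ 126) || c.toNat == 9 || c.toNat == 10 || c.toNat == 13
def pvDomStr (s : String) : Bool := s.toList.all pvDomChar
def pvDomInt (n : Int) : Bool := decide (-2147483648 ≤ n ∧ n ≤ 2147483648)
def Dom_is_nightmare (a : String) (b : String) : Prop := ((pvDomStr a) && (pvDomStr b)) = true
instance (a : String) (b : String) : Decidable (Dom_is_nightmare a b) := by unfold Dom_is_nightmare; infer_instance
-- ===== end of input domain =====

-- B replaces A's set-building loop + Counter + dict-iteration check by one sort and a
-- single run-length scan over the sorted characters (alternative decomposition, not faster).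

-- ===== PORT A =====
-- the 'for (key,val) in freq.items()' loop with its early 'return False'
def pvLoopA : List (Char × Int) → Bool
  | [] => true
  | (_, v) :: rest => if PySem.Int.mod v 2 == 0 then false else pvLoopA rest

def is_nightmare (a : String) (b : String) : Bool :=
  let t := a.toList ++ b.toList
  if t.length % 2 == 0 then false
  else
    let occur := (PySem.List.pyRange 0 (t.length : Int) 1).foldl
      (fun s i => PySem.Set.add s (PySem.List.pyGetD t i ' ')) PySem.Set.empty
    if occur.length ≠ 25 then false
    else pvLoopA (PySem.Dict.counter t).items

-- ===== PORT B =====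
-- the 'for c in s[1:]' run-length loop; state = (cur, runlen, groups)
def pvNightGo : List Char → Char → Nat → Nat → Bool
  | [], _, runlen, groups => runlen % 2 == 1 && groups + 1 == 25
  | c :: cs, cur, runlen, groups =>
    if c == cur then pvNightGo cs cur (runlen + 1) groups
    else if runlen % 2 == 0 then false
    else pvNightGo cs c 1 (groups + 1)

def is_nightmare_alt (a : String) (b : String) : Bool :=
  let t := a.toList ++ b.toList
  if t.length % 2 == 0 then false
  else
    match PySem.List.sorted t (fun x => x) false with
    | [] => false      -- unreachable: an odd-length t is nonempty (Python reads s[0])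
    | c :: cs => pvNightGo cs c 1 0

-- ===== PRECONDITION & SPEC =====
def Spec_is_nightmare (a : String) (b : String) (out : Bool) : Prop := out = is_nightmare_alt a b
instance (a : String) (b : String) (out : Bool) : Decidable (Spec_is_nightmare a b out) := by unfold Spec_is_nightmare; infer_instance

-- ===== CLAIM (what is proved, stated in full; the proofs are below) =====
def Claim_equal_is_nightmare : Prop := ∀ (a : String) (b : String), Dom_is_nightmare a b → Spec_is_nightmare a b (is_nightmare a b)

-- ===== LEMMAS AND PROOFS =====

lemma pvLoopA_eq_all (l : List (Char × Int)) :
    pvLoopA l = l.all (fun kv => !(PySem.Int.mod kv.2 2 == 0)) := by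
  induction l with
  | nil => rfl
  | cons kv rest ih =>
    obtain ⟨k, v⟩ := kv
    cases hv : (PySem.Int.mod v 2 == 0) with
    | true => simp only [pvLoopA, hv, if_true, List.all_cons, Bool.not_true, Bool.false_and]
    | false => simp only [pvLoopA, hv, Bool.false_eq_true, if_false, List.all_cons,
        Bool.not_false, Bool.true_and, ih]

-- one group on the front of a list: distinct count splits off 1
lemma card_cons_filter (c : Char) (cs : List Char) :
    (c :: cs).toFinset.card = (cs.filter (· != c)).toFinset.card + 1 := by
  have h1 : (cs.filter (· != c)).toFinset = cs.toFinset.erase c := by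
    ext x; simp [Finset.mem_erase]; tauto
  have h2 : (c :: cs).toFinset = insert c (cs.toFinset.erase c) := by
    ext x; simp [Finset.mem_insert, Finset.mem_erase]; tauto
  rw [h1, h2, Finset.card_insert_of_notMem (Finset.notMem_erase c _)]

-- characterisation of A's value
lemma is_nightmare_iff (a b : String) :
    is_nightmare a b = true ↔
      (a.toList ++ b.toList).length % 2 = 1 ∧
      (a.toList ++ b.toList).toFinset.card = 25 ∧
      ∀ c ∈ a.toList ++ b.toList, (a.toList ++ b.toList).count c % 2 = 1 := by
  set t := a.toList ++ b.toList with ht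
  unfold is_nightmare
  rw [← ht]
  by_cases hlen : t.length % 2 = 0
  · simp [hlen]
  · have hodd : t.length % 2 = 1 := by omega
    have hc1 : (t.length % 2 == 0) = false := by simp [hlen]
    have hfold : (PySem.List.pyRange 0 (t.length : Int) 1).foldl
        (fun s i => PySem.Set.add s (PySem.List.pyGetD t i ' ')) PySem.Set.empty
        = PySem.Set.ofList t := by
      have := PySem.List.foldl_pyRange_pyGetD (xs := t) (a := 0)
        (f := fun (s : List Char) (c : Char) => PySem.Set.add s c)
        (d := ' ') (init := PySem.Set.empty) (by norm_num)
      simpa [PySem.Set.ofList_eq_foldl, PySem.Set.empty] using this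
    have hcard : (PySem.Set.ofList t).length = t.toFinset.card := by
      have hnd : (PySem.Set.ofList t).Nodup := PySem.Set.nodup_ofList t
      have hfs : (PySem.Set.ofList t).toFinset = t.toFinset := by
        ext c; simp [List.mem_toFinset, PySem.Set.mem_ofList]
      rw [← hfs, List.toFinset_card_of_nodup hnd]
    simp only [hfold, hc1, Bool.false_eq_true, if_false]
    by_cases h25 : t.toFinset.card = 25
    · rw [if_neg (by rw [hcard]; omega)]
      rw [pvLoopA_eq_all, PySem.Dict.items_counter, List.all_eq_true]
      constructor
      · intro h
        refine ⟨hodd, h25, ?_⟩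
        intro c hc
        have := h ⟨c, (t.count c : Int)⟩
          (List.mem_map_of_mem ((PySem.Set.mem_ofList t c).mpr hc))
        rw [PySem.Int.mod_eq_emod_of_pos (by norm_num)] at this
        have h2 : ((t.count c : Int)) % 2 ≠ 0 := by simpa using this
        omega
      · rintro ⟨-, -, hall⟩
        rintro ⟨k, v⟩ hm
        simp only [List.mem_map] at hm
        obtain ⟨k', hk', heq⟩ := hm
        obtain ⟨rfl, rfl⟩ : k' = k ∧ (t.count k' : Int) = v := by
          constructor <;> · cases heq; rfl
        have hk : k' ∈ t := (PySem.Set.mem_ofList t k').mp hk'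
        have hone := hall k' hk
        rw [PySem.Int.mod_eq_emod_of_pos (by norm_num)]
        simp only [Bool.not_eq_true', beq_eq_false_iff_ne, ne_eq]
        omega
    · rw [if_pos (by rw [hcard]; omega)]
      simp [h25]

-- invariant of B's run-length loop over a sorted tail
lemma pvNightGo_iff (cs : List Char) (cur : Char) (runlen groups : Nat)
    (hp : (cur :: cs).Pairwise (· ≤ ·)) :
    pvNightGo cs cur runlen groups = true ↔
      (runlen + cs.count cur) % 2 = 1 ∧
      (∀ d ∈ cs, d ≠ cur → cs.count d % 2 = 1) ∧
      groups + 1 + (cs.filter (· != cur)).toFinset.card = 25 := by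
  induction cs generalizing cur runlen groups with
  | nil =>
    simp [pvNightGo]
  | cons c cs ih =>
    have hcur_le : ∀ x ∈ c :: cs, cur ≤ x := fun x hx => (List.pairwise_cons.mp hp).1 x hx
    have hp' : (c :: cs).Pairwise (· ≤ ·) := (List.pairwise_cons.mp hp).2
    by_cases hc : c = cur
    · subst hc
      rw [show pvNightGo (c :: cs) c runlen groups = pvNightGo cs c (runlen + 1) groups by
        simp [pvNightGo]]
      rw [ih c (runlen + 1) groups hp']
      have hfilter : (c :: cs).filter (· != c) = cs.filter (· != c) := by
        simp
      rw [hfilter]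
      constructor
      · rintro ⟨h1, h2, h3⟩
        refine ⟨by simp [List.count_cons_self]; omega, ?_, h3⟩
        intro d hd hdc
        rcases List.mem_cons.mp hd with rfl | hd'
        · exact absurd rfl hdc
        · rw [List.count_cons_of_ne (Ne.symm hdc)]
          exact h2 d hd' hdc
      · rintro ⟨h1, h2, h3⟩
        refine ⟨by simp [List.count_cons_self] at h1; omega, ?_, h3⟩
        intro d hd hdc
        have := h2 d (List.mem_cons_of_mem _ hd) hdc
        rwa [List.count_cons_of_ne (Ne.symm hdc)] at this
    · have hlt : cur < c := lt_of_le_of_ne (hcur_le c (List.mem_cons_self)) (Ne.symm hc)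
      have hcc : (c == cur) = false := by simp [hc]
      have hnotin : cur ∉ cs := by
        intro hx
        exact absurd ((List.pairwise_cons.mp hp').1 cur hx) (not_le.mpr hlt)
      have hcount0 : cs.count cur = 0 := List.count_eq_zero.mpr hnotin
      have hne_cur : ∀ x ∈ cs, x ≠ cur := fun x hx h => hnotin (h ▸ hx)
      rw [show pvNightGo (c :: cs) cur runlen groups
          = if runlen % 2 == 0 then false else pvNightGo cs c 1 (groups + 1) by
        simp [pvNightGo, hcc]]
      have hfilter : (c :: cs).filter (· != cur) = c :: cs := by
        rw [List.filter_cons_of_pos (by simp [hc]),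
          List.filter_eq_self.mpr (fun x hx => by simp [hne_cur x hx])]
      by_cases hrun : runlen % 2 = 0
      · rw [if_pos (by simp [hrun])]
        simp only [Bool.false_eq_true, false_iff]
        rintro ⟨h1, -, -⟩
        rw [List.count_cons_of_ne hc, hcount0] at h1
        omega
      · rw [if_neg (by simp [hrun]), ih c 1 (groups + 1) hp']
        rw [hfilter, List.count_cons_of_ne hc, hcount0, card_cons_filter]
        constructor
        · rintro ⟨h1, h2, h3⟩
          refine ⟨by omega, ?_, by omega⟩
          intro d hd hdc
          rcases List.mem_cons.mp hd with rfl | hd'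
          · rw [List.count_cons_self]; omega
          · by_cases hdceq : d = c
            · subst hdceq; rw [List.count_cons_self]; omega
            · rw [List.count_cons_of_ne (Ne.symm hdceq)]; exact h2 d hd' hdceq
        · rintro ⟨h1, h2, h3⟩
          have hcodd : (c :: cs).count c % 2 = 1 :=
            h2 c (List.mem_cons_self) hc
          rw [List.count_cons_self] at hcodd
          refine ⟨by omega, ?_, by omega⟩
          intro d hd hdc
          have := h2 d (List.mem_cons_of_mem _ hd) (hne_cur d hd)
          rwa [List.count_cons_of_ne (Ne.symm hdc)] at this

-- ===== VERDICT (by name: the statement is the Claim_ definition above) =====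
theorem is_nightmare_spec : Claim_equal_is_nightmare := by
  intro a b _
  unfold Spec_is_nightmare
  rw [Bool.eq_iff_iff, is_nightmare_iff]
  set t := a.toList ++ b.toList with ht
  unfold is_nightmare_alt
  rw [← ht]
  by_cases hlen : t.length % 2 = 0
  · simp [hlen]
  · have hodd : t.length % 2 = 1 := by omega
    have hc1 : (t.length % 2 == 0) = false := by simp [hlen]
    simp only [hc1, Bool.false_eq_true, if_false]
    have htne : t ≠ [] := by intro h; rw [h] at hodd; simp at hodd
    have hsne : PySem.List.sorted t (fun x => x) false ≠ [] := by
      simp [PySem.List.sorted_eq_nil_iff, htne]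
    obtain ⟨c, cs, heq⟩ : ∃ c cs, PySem.List.sorted t (fun x => x) false = c :: cs := by
      cases h : PySem.List.sorted t (fun x => x) false with
      | nil => exact absurd h hsne
      | cons c cs => exact ⟨c, cs, rfl⟩
    rw [heq]
    have hpair : (c :: cs).Pairwise (· ≤ ·) := by
      have := PySem.List.sorted_pairwise t (fun x => x)
      rw [heq] at this
      exact this
    have hperm : (c :: cs).Perm t := by
      have := PySem.List.sorted_perm t (fun x => x) false
      rw [heq] at this
      exact this
    rw [pvNightGo_iff cs c 1 0 hpair]
    have hcnt : ∀ x, t.count x = (c :: cs).count x := fun x => (hperm.count_eq x).symm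
    have hfs : t.toFinset = (c :: cs).toFinset := (List.toFinset_eq_of_perm _ _ hperm).symm
    have hmem : ∀ x, x ∈ t ↔ x ∈ c :: cs := fun x => (hperm.mem_iff).symm
    rw [hfs, card_cons_filter]
    constructor
    · rintro ⟨-, h2, h3⟩
      have hc_odd : (1 + cs.count c) % 2 = 1 := by
        have := h3 c ((hmem c).mpr (List.mem_cons_self))
        rw [hcnt c, List.count_cons_self] at this
        omega
      refine ⟨hc_odd, ?_, by omega⟩
      intro d hd hdc
      have := h3 d ((hmem d).mpr (List.mem_cons_of_mem _ hd))
      rw [hcnt d, List.count_cons_of_ne (Ne.symm hdc)] at this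
      exact this
    · rintro ⟨h1, h2, h3⟩
      refine ⟨hodd, by omega, ?_⟩
      intro x hx
      rw [hcnt x]
      rcases List.mem_cons.mp ((hmem x).mp hx) with rfl | hx'
      · rw [List.count_cons_self]; omega
      · by_cases hxc : x = c
        · subst hxc; rw [List.count_cons_self]; omega
        · rw [List.count_cons_of_ne (Ne.symm hxc)]; exact h2 x hx' hxc
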